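-- pv_equiv track=rewrite | github.com/spoonfloor/baby-eats | scripts/prune_dead_list_css.py | _next_significant
-- ===== SOURCE A (Python) =====
-- def _skip_string(s: str, i: int) -> int:
--     q = s[i]
--     i += 1
--     n = len(s)
--     while i < n:
--         c = s[i]
--         if c == "\\" and i + 1 < n:
--             i += 2
--             continue
--         if c == q:
--             return i + 1
--         i += 1
--     return n
--
-- def _next_significant(s: str, i: int) -> int:
--     """Skip only whitespace and quoted strings. Keep `/*` for the main loop to copy."""
--     n = len(s)
--     while i < n:
--         if i < n and s[i] in "\n\r\t ":
--             i += 1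
--             continue
--         if i < n and s[i] in "\"'":
--             i = _skip_string(s, i)
--             continue
--         break
--     return i
-- ===== SOURCE B (Python) =====
-- def _next_significant(s: str, i: int) -> int:
--     """Skip only whitespace and quoted strings. Keep `/*` for the main loop to copy."""
--     n = len(s)
--     in_string = False
--     quote = ""
--     esc = False
--     while i < n:
--         c = s[i]
--         if in_string:
--             if esc:
--                 esc = False
--             elif c == "\\":
--                 esc = True
--             elif c == quote:
--                 in_string = False
--             i += 1
--         elif c in "\n\r\t ":
--             i += 1
--         elif c in "\"'":
--             in_string = True
--             quote = c
--             i += 1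
--         else:
--             break
--     return i
-- ===== Notes on version B (the rewrite author's own statement) =====
-- stated objective: simpler
-- what changed: Replaced A's two-function decomposition (main loop calling a _skip_string helper with its own scanning loop) by one flat loop over the index that carries in_string / quote-char / escape-pending state.
import Mathlib
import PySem

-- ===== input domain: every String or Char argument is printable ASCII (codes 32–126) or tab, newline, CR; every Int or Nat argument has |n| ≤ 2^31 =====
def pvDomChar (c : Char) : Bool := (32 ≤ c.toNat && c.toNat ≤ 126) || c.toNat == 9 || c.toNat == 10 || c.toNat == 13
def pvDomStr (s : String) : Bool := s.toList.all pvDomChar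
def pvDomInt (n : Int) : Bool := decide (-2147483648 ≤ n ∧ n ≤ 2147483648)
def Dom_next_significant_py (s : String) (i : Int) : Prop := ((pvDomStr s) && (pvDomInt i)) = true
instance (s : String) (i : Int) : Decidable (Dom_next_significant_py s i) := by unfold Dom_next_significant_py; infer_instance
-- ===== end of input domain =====

-- B replaces A's `_skip_string` helper by one flat loop over `i` carrying
-- in-string / quote-char / escape-pending state (objective: simpler decomposition).

-- arithmetic facts cited by the termination proofs (kept as named lemmas so the
-- recursive definitions stay small)
theorem pvDec1 (n i : Int) (h : i < n) : (n - (i + 1)).toNat < (n - i).toNat := by omega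
theorem pvDec2 (n i : Int) (h : i < n) : (n - (i + 2)).toNat < (n - i).toNat := by omega
theorem pvDecLt (n i j : Int) (h1 : i < n) (h2 : i < j) : (n - j).toNat < (n - i).toNat := by omega

-- ===== PORT A =====
-- the while-loop of `_skip_string` (q = s[i] already read, scanning from i)
def pvSkipLoop (s : List Char) (q : Char) (i : Int) : Int :=
  if i < (s.length : Int) then
    match PySem.List.pyGet? s i with
    | none => i  -- Python raises IndexError here; unreachable under Pre_
    | some c =>
      if c = '\\' ∧ i + 1 < (s.length : Int) then pvSkipLoop s q (i + 2)
      else if c = q then i + 1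
      else pvSkipLoop s q (i + 1)
  else (s.length : Int)
termination_by ((s.length : Int) - i).toNat
decreasing_by
  · exact pvDec2 _ _ (by assumption)
  · exact pvDec1 _ _ (by assumption)

theorem pvSkipLoop_ge (s : List Char) (q : Char) (i : Int) :
    min i (s.length : Int) ≤ pvSkipLoop s q i := by
  fun_induction pvSkipLoop s q i with
  | _ => omega

def pvSkipString (s : List Char) (i : Int) : Int :=
  match PySem.List.pyGet? s i with
  | none => i + 1  -- Python raises IndexError here; unreachable under Pre_
  | some q => pvSkipLoop s q (i + 1)

theorem pvSkipString_gt (s : List Char) (i : Int) (h : i < (s.length : Int)) :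
    i < pvSkipString s i := by
  unfold pvSkipString
  cases h' : PySem.List.pyGet? s i with
  | none => exact lt_add_one i
  | some q =>
    show i < pvSkipLoop s q (i + 1)
    have := pvSkipLoop_ge s q (i + 1); omega

-- the while-loop of `_next_significant`
def pvNextLoop (s : List Char) (i : Int) : Int :=
  if i < (s.length : Int) then
    match PySem.List.pyGet? s i with
    | none => i  -- Python raises IndexError here; unreachable under Pre_
    | some c =>
      if c = '\n' ∨ c = '\r' ∨ c = '\t' ∨ c = ' ' then pvNextLoop s (i + 1)
      else if c = '"' ∨ c = '\'' then pvNextLoop s (pvSkipString s i)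
      else i
  else i
termination_by ((s.length : Int) - i).toNat
decreasing_by
  · exact pvDec1 _ _ (by assumption)
  · exact pvDecLt _ _ _ (by assumption) (pvSkipString_gt s i (by assumption))

def next_significant_py (s : String) (i : Int) : Int := pvNextLoop s.toList i

-- ===== PORT B =====
-- one flat loop: `instr` = inside a quoted string, `q` = its quote char, `esc` = escape pending
def pvAltLoop (s : List Char) (i : Int) (instr : Bool) (q : Char) (esc : Bool) : Int :=
  if i < (s.length : Int) then
    match PySem.List.pyGet? s i with
    | none => i  -- Python raises IndexError here; unreachable under Pre_
    | some c =>
      if instr then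
        if esc then pvAltLoop s (i + 1) instr q false
        else if c = '\\' then pvAltLoop s (i + 1) instr q true
        else if c = q then pvAltLoop s (i + 1) false q false
        else pvAltLoop s (i + 1) instr q esc
      else if c = '\n' ∨ c = '\r' ∨ c = '\t' ∨ c = ' ' then pvAltLoop s (i + 1) instr q esc
      else if c = '"' ∨ c = '\'' then pvAltLoop s (i + 1) true c false
      else i
  else i
termination_by ((s.length : Int) - i).toNat
decreasing_by all_goals exact pvDec1 _ _ (by assumption)

def next_significant_py_alt (s : String) (i : Int) : Int :=
  pvAltLoop s.toList i false ' ' false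

-- ===== PRECONDITION & SPEC =====
-- Pre_ excludes i < -len(s): there Python's s[i] raises IndexError in both A and B.
def Pre_next_significant_py (s : String) (i : Int) : Prop := -(s.length : Int) ≤ i
instance (s : String) (i : Int) : Decidable (Pre_next_significant_py s i) := by
  unfold Pre_next_significant_py; infer_instance

def pvWitness_next_significant_py : String × Int := (" 'a' b", 0)

def Spec_next_significant_py (s : String) (i : Int) (out : Int) : Prop := out = next_significant_py_alt s i
instance (s : String) (i : Int) (out : Int) : Decidable (Spec_next_significant_py s i out) := by unfold Spec_next_significant_py; infer_instance

-- ===== CLAIM (what is proved, stated in full; the proofs are below) =====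
def Claim_equal_next_significant_py : Prop := ∀ (s : String) (i : Int), Dom_next_significant_py s i → Pre_next_significant_py s i → Spec_next_significant_py s i (next_significant_py s i)

-- ===== LEMMAS AND PROOFS =====

theorem pvSkipLoop_le (s : List Char) (q : Char) (i : Int) (h : i ≤ (s.length : Int)) :
    pvSkipLoop s q i ≤ (s.length : Int) := by
  fun_induction pvSkipLoop s q i with
  | _ => omega


theorem pvGet_some (s : List Char) (i : Int) (h0 : -(s.length : Int) ≤ i)
    (h1 : i < (s.length : Int)) : ∃ c, PySem.List.pyGet? s i = some c := by
  cases hc : PySem.List.pyGet? s i with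
  | some c => exact ⟨c, rfl⟩
  | none =>
    rw [PySem.List.pyGet?_eq_none_iff] at hc
    exact absurd ⟨h0, h1⟩ hc

theorem pvAltLoop_len (s : List Char) (b : Bool) (q : Char) (e : Bool) :
    pvAltLoop s (s.length : Int) b q e = (s.length : Int) := by
  rw [pvAltLoop.eq_def]; simp

-- when outside a string, B's loop ignores the quote and escape state
theorem pvAltLoop_out_irrel (s : List Char) :
    ∀ k i q e q' e', ((s.length : Int) - i).toNat = k →
      pvAltLoop s i false q e = pvAltLoop s i false q' e' := by
  intro k
  induction k using Nat.strong_induction_on with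
  | _ k ih =>
    intro i q e q' e' hk
    rw [pvAltLoop.eq_def, pvAltLoop.eq_def (q := q')]
    by_cases hi : i < (s.length : Int)
    · simp only [hi, if_true]
      cases hc : PySem.List.pyGet? s i with
      | none => rfl
      | some c =>
        simp only [Bool.false_eq_true, if_false]
        split_ifs with h1 h2
        · exact ih _ (by omega) (i + 1) q e q' e' rfl
        · rfl
        · rfl
    · simp [hi]

-- B's in-string stepping from index i lands exactly where A's `_skip_string` loop lands
theorem pvAltLoop_instr (s : List Char) (q : Char) :
    ∀ k i, ((s.length : Int) - i).toNat = k → -(s.length : Int) ≤ i → i ≤ (s.length : Int) →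
      pvAltLoop s i true q false = pvAltLoop s (pvSkipLoop s q i) false q false := by
  intro k
  induction k using Nat.strong_induction_on with
  | _ k ih =>
    intro i hk h0 h1
    by_cases hi : i < (s.length : Int)
    · obtain ⟨c, hc⟩ := pvGet_some s i h0 hi
      rw [pvAltLoop.eq_def, pvSkipLoop.eq_def]
      simp only [hi, if_true, hc]
      by_cases hb : c = '\\'
      · by_cases hn : i + 1 < (s.length : Int)
        · -- escape consumes two characters
          obtain ⟨c', hc'⟩ := pvGet_some s (i + 1) (by omega) hn
          simp only [hb, hn, and_true, if_true, Bool.false_eq_true, if_false]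
          rw [pvAltLoop.eq_def]
          simp only [hn, if_true, hc']
          have h2 := ih _ (by omega) (i + 2) rfl (by omega) (by omega)
          simpa [show i + 1 + 1 = i + 2 from by ring] using h2
        · -- trailing backslash: both sides end at len = i + 1
          have hlen : i + 1 = (s.length : Int) := by omega
          have hskip : pvSkipLoop s q (i + 1) = (s.length : Int) := by
            rw [pvSkipLoop.eq_def]; simp [hn]
          simp only [hb, hn, and_false, Bool.false_eq_true, if_false, if_true]
          rw [pvAltLoop.eq_def]
          simp only [hn, if_false]
          by_cases hq : '\\' = q
          · rw [if_pos hq, hlen, pvAltLoop_len]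
          · rw [if_neg hq, hskip, hlen, pvAltLoop_len]
      · simp only [hb, if_false, false_and, Bool.false_eq_true]
        by_cases hq : c = q
        · simp [hq]
        · simp only [hq, if_false]
          exact ih _ (by omega) (i + 1) rfl (by omega) (by omega)
    · -- i = len: skip loop returns len = i, both sides return i
      have hlen : i = (s.length : Int) := by omega
      rw [pvSkipLoop.eq_def]
      simp only [hi, if_false]
      rw [hlen, pvAltLoop_len, pvAltLoop_len]

-- the main loops agree
theorem pvMain (s : List Char) :
    ∀ k i, ((s.length : Int) - i).toNat = k → -(s.length : Int) ≤ i →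
      pvNextLoop s i = pvAltLoop s i false ' ' false := by
  intro k
  induction k using Nat.strong_induction_on with
  | _ k ih =>
    intro i hk h0
    by_cases hi : i < (s.length : Int)
    · obtain ⟨c, hc⟩ := pvGet_some s i h0 hi
      rw [pvNextLoop.eq_def, pvAltLoop.eq_def]
      simp only [hi, if_true, hc, Bool.false_eq_true, if_false]
      split_ifs with h1 h2
      · exact ih _ (by omega) (i + 1) rfl (by omega)
      · -- quote: A runs _skip_string, B enters in-string state
        have hskip_ge := pvSkipLoop_ge s c (i + 1)
        have hskip_le := pvSkipLoop_le s c (i + 1) (by omega)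
        calc pvNextLoop s (pvSkipString s i)
            = pvNextLoop s (pvSkipLoop s c (i + 1)) := by
              simp only [pvSkipString, hc]
          _ = pvAltLoop s (pvSkipLoop s c (i + 1)) false ' ' false := by
              exact ih _ (by omega) _ rfl (by omega)
          _ = pvAltLoop s (pvSkipLoop s c (i + 1)) false c false := by
              exact pvAltLoop_out_irrel s _ _ ' ' false c false rfl
          _ = pvAltLoop s (i + 1) true c false := by
              exact (pvAltLoop_instr s c _ (i + 1) rfl (by omega) (by omega)).symm
      · rfl
    · rw [pvNextLoop.eq_def, pvAltLoop.eq_def]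
      simp [hi]

-- ===== VERDICT (by name: the statement is the Claim_ definition above) =====
theorem next_significant_py_spec : Claim_equal_next_significant_py := by
  intro s i _ hpre
  unfold Spec_next_significant_py next_significant_py next_significant_py_alt
  exact pvMain s.toList _ i rfl (by simpa [Pre_next_significant_py] using hpre)
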